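-- pv_equiv track=rewrite | github.com/TheVinz/AdventOfCode2022 | Day25/part1.py | snafu2dec
-- ===== SOURCE A (Python) =====
-- def snafu2dec(snafu):
--     if len(snafu)==0:
--         return 0
--     if len(snafu)==1:
--         match snafu:
--             case '2':
--                 return 2
--             case '1':
--                 return 1
--             case '0':
--                 return 0
--             case '-':
--                 return -1
--             case '=':
--                 return -2
--
--     p = 1
--     res = 0
--     for d in reversed(snafu):
--         res += p*snafu2dec(d)
--         p*=5
--     return res
-- ===== SOURCE B (Python) =====
-- def snafu2dec(snafu):
--     digits = {'2': 2, '1': 1, '0': 0, '-': -1, '=': -2}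
--     res = 0
--     for d in snafu:
--         res = res * 5 + digits[d]
--     return res
-- ===== Notes on version B (the rewrite author's own statement) =====
-- stated objective: simpler
-- what changed: Replaces the recursive reversed-scan with an explicit power accumulator by a single forward Horner pass over a digit dictionary (no recursion, no power variable).
import Mathlib
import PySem

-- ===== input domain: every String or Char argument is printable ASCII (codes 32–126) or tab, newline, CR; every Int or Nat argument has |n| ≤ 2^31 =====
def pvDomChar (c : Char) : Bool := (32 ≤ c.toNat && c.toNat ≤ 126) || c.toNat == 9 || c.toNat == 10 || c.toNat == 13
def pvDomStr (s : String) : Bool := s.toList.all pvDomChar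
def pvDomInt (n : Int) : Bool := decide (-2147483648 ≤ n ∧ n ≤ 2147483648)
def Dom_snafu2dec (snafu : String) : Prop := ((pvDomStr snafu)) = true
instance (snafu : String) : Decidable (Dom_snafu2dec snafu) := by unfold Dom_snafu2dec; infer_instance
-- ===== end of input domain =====

-- B replaces A's recursive reversed-scan with a power accumulator by a single
-- forward Horner pass over a digit dictionary (objective: simpler).


-- ===== PORT A =====
-- value of A's recursive call on a single-character string; `none` marks the
-- characters on which Python's fall-through recursion never returns
-- (RecursionError) — those inputs are outside Pre_snafu2dec.
def snafuDigit (c : Char) : Option Int :=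
  match c with
  | '2' => some 2
  | '1' => some 1
  | '0' => some 0
  | '-' => some (-1)
  | '=' => some (-2)
  | _ => none

-- A's loop: `for d in reversed(snafu): res += p*snafu2dec(d); p *= 5`
def snafuLoop (l : List Char) : Int × Int :=
  l.reverse.foldl (fun s d => (s.1 * 5, s.2 + s.1 * ((snafuDigit d).getD 0))) (1, 0)

def snafu2dec (snafu : String) : Int :=
  let l := snafu.toList
  if l.length == 0 then 0
  else if l.length == 1 then
    match l with
    | ['2'] => 2
    | ['1'] => 1
    | ['0'] => 0
    | ['-'] => -1
    | ['='] => -2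
    | _ => (snafuLoop l).2   -- Python falls through to the loop here (and then recurses forever; outside Pre_)
  else (snafuLoop l).2

-- ===== PORT B =====
def pvDigitsDict : PySem.Dict Char Int :=
  PySem.Dict.ofList [('2', 2), ('1', 1), ('0', 0), ('-', -1), ('=', -2)]

-- `res = res*5 + digits[d]`; a missing key is Python's KeyError — outside Pre_.
def snafu2dec_alt (snafu : String) : Int :=
  snafu.toList.foldl (fun res d => res * 5 + ((pvDigitsDict.get? d).getD 0)) 0

-- ===== PRECONDITION & SPEC =====
-- A raises (RecursionError via the single-char fall-through) on any string
-- containing a character that is not one of the five SNAFU digits; Pre_ admits exactly the others.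
def Pre_snafu2dec (snafu : String) : Prop :=
  snafu.toList.all (fun c => c ∈ ['2', '1', '0', '-', '=']) = true
instance (snafu : String) : Decidable (Pre_snafu2dec snafu) := by unfold Pre_snafu2dec; infer_instance
def pvWitness_snafu2dec : String := "2=-01"
def Spec_snafu2dec (snafu : String) (out : Int) : Prop := out = snafu2dec_alt snafu
instance (snafu : String) (out : Int) : Decidable (Spec_snafu2dec snafu out) := by unfold Spec_snafu2dec; infer_instance

-- ===== CLAIM (what is proved, stated in full; the proofs are below) =====
def Claim_equal_snafu2dec : Prop := ∀ (snafu : String), Dom_snafu2dec snafu → Pre_snafu2dec snafu → Spec_snafu2dec snafu (snafu2dec snafu)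

-- ===== LEMMAS AND PROOFS =====

-- positional value Σ 5^i · digit(l[i]) read least-significant-first
def snafuH (l : List Char) : Int :=
  match l with
  | [] => 0
  | d :: t => (snafuDigit d).getD 0 + 5 * snafuH t

theorem snafuLoop_foldl (xs : List Char) (p res : Int) :
    xs.foldl (fun s d => (s.1 * 5, s.2 + s.1 * ((snafuDigit d).getD 0))) (p, res)
      = (p * 5 ^ xs.length, res + p * snafuH xs) := by
  induction xs generalizing p res with
  | nil => simp [snafuH]
  | cons d t ih =>
      simp only [List.foldl_cons, ih, snafuH, List.length_cons, Prod.mk.injEq]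
      constructor <;> ring

theorem snafuH_append (xs : List Char) (d : Char) :
    snafuH (xs ++ [d]) = snafuH xs + 5 ^ xs.length * (snafuDigit d).getD 0 := by
  induction xs with
  | nil => simp [snafuH]
  | cons c t ih => simp only [List.cons_append, snafuH, ih, List.length_cons]; ring

theorem dictLit : pvDigitsDict
    = PySem.Dict.mk [('2', 2), ('1', 1), ('0', 0), ('-', -1), ('=', -2)] := by decide

theorem digEq (c : Char) : (pvDigitsDict.get? c).getD 0 = (snafuDigit c).getD 0 := by
  rw [dictLit]
  unfold snafuDigit
  split
  · decide
  · decide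
  · decide
  · decide
  · decide
  · next h1 h2 h3 h4 h5 =>
      simp [Ne.symm h1, Ne.symm h2, Ne.symm h3,
        Ne.symm h4, Ne.symm h5, PySem.Dict.get?]

theorem horner_foldl (l : List Char) (r : Int) :
    l.foldl (fun res d => res * 5 + ((pvDigitsDict.get? d).getD 0)) r
      = r * 5 ^ l.length + snafuH l.reverse := by
  induction l generalizing r with
  | nil => simp [snafuH]
  | cons d t ih =>
      simp only [List.foldl_cons, ih, List.reverse_cons, snafuH_append,
        List.length_reverse, List.length_cons]
      rw [digEq]
      ring

theorem loop_eq_alt (l : List Char) :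
    (snafuLoop l).2 = l.foldl (fun res d => res * 5 + ((pvDigitsDict.get? d).getD 0)) 0 := by
  unfold snafuLoop
  rw [snafuLoop_foldl, horner_foldl]
  simp

-- ===== VERDICT (by name: the statement is the Claim_ definition above) =====
theorem snafu2dec_spec : Claim_equal_snafu2dec := by
  intro snafu _ hpre
  unfold Spec_snafu2dec
  simp only [snafu2dec, snafu2dec_alt]
  split
  · next h =>
      simp only [beq_iff_eq, List.length_eq_zero_iff] at h
      rw [h]
      rfl
  · split
    · next h1 =>
        -- single character: the match arms versus one Horner step
        simp only [beq_iff_eq, List.length_eq_one_iff] at h1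
        obtain ⟨c, hc⟩ := h1
        have hcpre : c ∈ ['2', '1', '0', '-', '='] := by
          have hp := hpre; unfold Pre_snafu2dec at hp
          simp only [hc, List.all_cons, List.all_nil, Bool.and_true] at hp
          simpa using hp
        rw [hc]
        fin_cases hcpre <;> decide
    · exact loop_eq_alt _
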